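-- pv_equiv track=rewrite | github.com/isegura/OCWEDA2022 | TEMA7/tema7_problemas.py | findLowestEvenOdd
-- ===== SOURCE A (Python) =====
-- def findLowestEvenOdd(A):
--     """returns the lowest even and the lowest odd of A"""
--
--     if A is None or len(A) == 0:
--         return None, None
--
--     if len(A) == 1:
--         if A[0] % 2 == 0:
--             return A[0], None
--         else:
--             return None, A[0]
--
--     # dividir
--     m = len(A) // 2
--     part1 = A[0:m]
--     part2 = A[m:]
--
--     minEven1, minOdd1 = findLowestEvenOdd(part1)
--     minEven2, minOdd2 = findLowestEvenOdd(part2)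
--
--     if minEven1 is not None and minEven2 is not None:
--         minEven = min(minEven1, minEven2)
--     elif minEven1 is None and minEven2 is not None:
--         minEven = minEven2
--     elif minEven2 is None and minEven1 is not None:
--         minEven = minEven1
--     else:  # los dos son None
--         minEven = None
--
--     if minOdd1 is not None and minOdd2 is not None:
--         minOdd = min(minOdd1, minOdd2)
--     elif minOdd1 is None and minOdd2 is not None:
--         minOdd = minOdd2
--     elif minOdd2 is None and minOdd1 is not None:
--         minOdd = minOdd1
--     else:  # los dos son None
--         minOdd = None
--
--     return minEven, minOdd
-- ===== SOURCE B (Python) =====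
-- def findLowestEvenOdd(A):
--     """returns the lowest even and the lowest odd of A"""
--     if A is None or len(A) == 0:
--         return None, None
--     minEven = None
--     minOdd = None
--     for x in A:
--         if x % 2 == 0:
--             minEven = x if minEven is None else min(minEven, x)
--         else:
--             minOdd = x if minOdd is None else min(minOdd, x)
--     return minEven, minOdd
-- ===== Notes on version B (the rewrite author's own statement) =====
-- stated objective: faster
-- what changed: Replaces the divide-and-conquer recursion (split in half via slicing, recurse, merge the two (even,odd) pairs through an if/elif chain) with one iterative pass keeping two running minima.
import Mathlib
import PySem

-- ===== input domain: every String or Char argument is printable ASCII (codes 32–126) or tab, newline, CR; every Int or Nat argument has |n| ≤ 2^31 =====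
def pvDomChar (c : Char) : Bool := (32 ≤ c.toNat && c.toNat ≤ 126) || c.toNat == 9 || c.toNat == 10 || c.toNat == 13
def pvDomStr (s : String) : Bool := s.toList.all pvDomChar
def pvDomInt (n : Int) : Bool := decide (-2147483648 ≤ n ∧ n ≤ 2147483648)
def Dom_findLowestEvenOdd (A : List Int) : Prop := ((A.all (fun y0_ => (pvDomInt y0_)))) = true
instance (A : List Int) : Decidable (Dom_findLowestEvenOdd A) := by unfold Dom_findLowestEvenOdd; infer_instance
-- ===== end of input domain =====

-- B replaces A's divide-and-conquer recursion by a single accumulator pass; same result, simpler.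

-- ===== PORT A =====
-- A[0:m] / A[m:] on 0 ≤ m ≤ len are exactly List.take m / List.drop m (PySem.List.slice_to / slice_from);
-- len(A)//2 on the nonnegative length is Nat division.
def findLowestEvenOdd : List Int → Option Int × Option Int
  | [] => (none, none)
  | [a] => if PySem.Int.mod a 2 = 0 then (some a, none) else (none, some a)
  | a :: b :: rest =>
    let A := a :: b :: rest
    let m := A.length / 2
    let part1 := A.take m
    let part2 := A.drop m
    match findLowestEvenOdd part1, findLowestEvenOdd part2 with
    | (minEven1, minOdd1), (minEven2, minOdd2) =>
      (match minEven1, minEven2 with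
       | some x, some y => some (min x y)
       | none, some y => some y
       | some x, none => some x
       | none, none => none,
       match minOdd1, minOdd2 with
       | some x, some y => some (min x y)
       | none, some y => some y
       | some x, none => some x
       | none, none => none)
  termination_by A => A.length
  decreasing_by
    · simp [List.length_take]; omega
    · simp [List.length_drop]; omega

-- ===== PORT B =====
-- x if minEven is None else min(minEven, x)
def fleoUpd (cur : Option Int) (x : Int) : Option Int :=
  match cur with
  | none => some x
  | some v => some (min v x)

-- one body of B's for-loop
def fleoStep (acc : Option Int × Option Int) (x : Int) : Option Int × Option Int :=
  if PySem.Int.mod x 2 = 0 then (fleoUpd acc.1 x, acc.2) else (acc.1, fleoUpd acc.2 x)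

def findLowestEvenOdd_alt (A : List Int) : Option Int × Option Int :=
  if A = [] then (none, none)
  else A.foldl fleoStep (none, none)

-- ===== PRECONDITION & SPEC =====
def Spec_findLowestEvenOdd (A : List Int) (out : Option Int × Option Int) : Prop := out = findLowestEvenOdd_alt A
instance (A : List Int) (out : Option Int × Option Int) : Decidable (Spec_findLowestEvenOdd A out) := by unfold Spec_findLowestEvenOdd; infer_instance

-- ===== CLAIM (what is proved, stated in full; the proofs are below) =====
def Claim_equal_findLowestEvenOdd : Prop := ∀ (A : List Int), Dom_findLowestEvenOdd A → Spec_findLowestEvenOdd A (findLowestEvenOdd A)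

-- ===== LEMMAS AND PROOFS =====

-- A's merge of two optional minima (its if/elif chain), as a function
def fleoMin (p q : Option Int) : Option Int :=
  match p, q with
  | some x, some y => some (min x y)
  | none, some y => some y
  | some x, none => some x
  | none, none => none

def fleoMerge (p q : Option Int × Option Int) : Option Int × Option Int :=
  (fleoMin p.1 q.1, fleoMin p.2 q.2)

theorem fleoMin_none_right (p : Option Int) : fleoMin p none = p := by
  cases p <;> rfl

theorem fleoMin_some (p : Option Int) (x : Int) : fleoMin p (some x) = fleoUpd p x := by
  cases p <;> rfl

theorem fleoMin_assoc (p q r : Option Int) :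
    fleoMin (fleoMin p q) r = fleoMin p (fleoMin q r) := by
  cases p <;> cases q <;> cases r <;> simp [fleoMin, min_assoc]

theorem foldl_fleoStep_merge (l : List Int) (acc : Option Int × Option Int) :
    l.foldl fleoStep acc = fleoMerge acc (l.foldl fleoStep (none, none)) := by
  induction l generalizing acc with
  | nil => simp [fleoMerge, fleoMin_none_right]
  | cons x l ih =>
    simp only [List.foldl_cons]
    rw [ih (fleoStep acc x), ih (fleoStep (none, none) x)]
    have h : fleoStep acc x = fleoMerge acc (fleoStep (none, none) x) := by
      unfold fleoStep
      split_ifs <;> simp [fleoMerge, fleoUpd, fleoMin_some, fleoMin_none_right]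
    rw [h]
    -- associativity of fleoMerge
    show fleoMerge (fleoMerge acc (fleoStep (none, none) x)) _ = _
    unfold fleoMerge
    simp [fleoMin_assoc]

theorem foldl_fleoStep_append (l1 l2 : List Int) :
    (l1 ++ l2).foldl fleoStep (none, none) =
      fleoMerge (l1.foldl fleoStep (none, none)) (l2.foldl fleoStep (none, none)) := by
  rw [List.foldl_append, foldl_fleoStep_merge]

theorem findLowestEvenOdd_eq_fold (A : List Int) :
    findLowestEvenOdd A = A.foldl fleoStep (none, none) := by
  fun_induction findLowestEvenOdd A with
  | case1 => rfl
  | case2 a h =>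
    simp only [List.foldl_cons, List.foldl_nil, fleoStep, fleoUpd]
    rw [if_pos h]
  | case3 a h =>
    simp only [List.foldl_cons, List.foldl_nil, fleoStep, fleoUpd]
    rw [if_neg h]
  | case4 a b rest A m p1 p2 me1 mo1 me2 mo2 hdrop htake ihtake ihdrop =>
    have hsplit := foldl_fleoStep_append
      ((a :: b :: rest).take ((a :: b :: rest).length / 2))
      ((a :: b :: rest).drop ((a :: b :: rest).length / 2))
    rw [List.take_append_drop] at hsplit
    rw [hsplit, ← ihtake, ← ihdrop, htake, hdrop]
    simp [fleoMerge, fleoMin]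

-- ===== VERDICT (by name: the statement is the Claim_ definition above) =====
theorem findLowestEvenOdd_spec : Claim_equal_findLowestEvenOdd := by
  intro A _
  unfold Spec_findLowestEvenOdd findLowestEvenOdd_alt
  rw [findLowestEvenOdd_eq_fold]
  split_ifs with h
  · simp [h]
  · rfl
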